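-- pv_equiv track=rewrite | github.com/Divya-3094/Python | comprehensions.py | sunnynumber
-- ===== SOURCE A (Python) =====
-- def sunnynumber(num):
--     issunny=False
--     for x in range(1,num):
--         if (x**2==num+1):
--             issunny=True
--             break
--     if issunny:
--         return True
--     else:
--         return False
-- ===== SOURCE B (Python) =====
-- def sunnynumber(num):
--     target = num + 1
--     if num < 2:
--         return False
--     total = 0
--     k = 1
--     while total < target:
--         total += k
--         k += 2
--     return total == target
-- ===== Notes on version B (the rewrite author's own statement) =====
-- stated objective: alternative
-- what changed: Replaces the scan of x in range(1,num) testing x**2==num+1 with an accumulator loop that builds successive perfect squares by adding consecutive odd numbers and stops at the first square >= num+1; a num<2 guard reproduces the empty-range behaviour.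
import Mathlib
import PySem

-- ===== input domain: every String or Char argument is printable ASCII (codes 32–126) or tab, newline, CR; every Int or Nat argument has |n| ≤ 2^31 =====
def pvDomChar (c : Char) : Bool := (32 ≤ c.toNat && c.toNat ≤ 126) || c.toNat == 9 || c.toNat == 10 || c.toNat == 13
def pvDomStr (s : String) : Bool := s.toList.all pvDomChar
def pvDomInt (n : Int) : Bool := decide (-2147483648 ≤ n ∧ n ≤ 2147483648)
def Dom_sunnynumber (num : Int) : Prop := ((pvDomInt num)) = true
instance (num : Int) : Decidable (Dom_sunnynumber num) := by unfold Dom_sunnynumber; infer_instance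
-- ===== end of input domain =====

-- B replaces A's linear scan testing x**2 == num+1 with an accumulator loop that
-- builds successive perfect squares by summing consecutive odd numbers (objective: alternative/faster).

-- ===== PORT A =====
-- for x in range(1,num): if x**2 == num+1: issunny = True; break
-- (after the flag is set the remaining iterations do not change it, so the break is
-- modelled by the fold keeping a true accumulator unchanged)
def sunnynumber (num : Int) : Bool :=
  let issunny := (PySem.List.pyRange 1 num 1).foldl
    (fun b x => if b then b else decide (x * x = num + 1)) false
  if issunny then true else false

-- ===== PORT B =====
-- while total < target: total += k; k += 2    (the 0 < k conjunct only makes the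
-- recursion total; every call from sunnynumber_alt has k ≥ 1)
def sunnyLoop (target total k : Int) : Bool :=
  if h : total < target ∧ 0 < k then sunnyLoop target (total + k) (k + 2)
  else decide (total = target)
termination_by (target - total).toNat
decreasing_by omega

def sunnynumber_alt (num : Int) : Bool :=
  let target := num + 1
  if num < 2 then false
  else sunnyLoop target 0 1

-- ===== PRECONDITION & SPEC =====
def Spec_sunnynumber (num : Int) (out : Bool) : Prop := out = sunnynumber_alt num
instance (num : Int) (out : Bool) : Decidable (Spec_sunnynumber num out) := by unfold Spec_sunnynumber; infer_instance

-- ===== CLAIM (what is proved, stated in full; the proofs are below) =====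
def Claim_equal_sunnynumber : Prop := ∀ (num : Int), Dom_sunnynumber num → Spec_sunnynumber num (sunnynumber num)

-- ===== LEMMAS AND PROOFS =====

-- the fold in port A is an 'any'
theorem foldl_or_eq (q : Int → Bool) (l : List Int) (b : Bool) :
    l.foldl (fun b x => if b then b else q x) b = (b || l.any q) := by
  induction l generalizing b with
  | nil => simp
  | cons y ys ih =>
    simp only [List.foldl_cons, List.any_cons]
    cases b <;> simp [ih]

theorem sunnynumber_iff (num : Int) :
    sunnynumber num = true ↔ ∃ x : Int, 1 ≤ x ∧ x < num ∧ x * x = num + 1 := by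
  have hif : ∀ c : Bool, (if c = true then true else false) = c := by
    intro c; cases c <;> simp
  simp only [sunnynumber, foldl_or_eq, Bool.false_or]
  rw [hif, List.any_eq_true]
  simp only [decide_eq_true_eq, PySem.List.mem_pyRange_one]
  tauto

-- invariant of B's loop: total = m², k = 2m+1; it finds the least square ≥ target
theorem sunnyLoop_iff (target : Int) : ∀ (m : Int), 0 ≤ m →
    (sunnyLoop target (m * m) (2 * m + 1) = true ↔ ∃ r : Int, m ≤ r ∧ r * r = target) := by
  intro m hm
  induction hn : (target - m * m).toNat using Nat.strong_induction_on generalizing m with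
  | _ n ih =>
    rw [sunnyLoop]
    by_cases hlt : m * m < target
    · have hk : (0:Int) < 2 * m + 1 := by omega
      rw [dif_pos ⟨hlt, hk⟩]
      have e1 : m * m + (2 * m + 1) = (m + 1) * (m + 1) := by ring
      have e2 : 2 * m + 1 + 2 = 2 * (m + 1) + 1 := by ring
      have hdec : (target - (m + 1) * (m + 1)).toNat < n := by
        subst hn
        have : (m + 1) * (m + 1) > m * m := by nlinarith
        omega
      rw [e1, e2, ih _ hdec (m + 1) (by omega) rfl]
      constructor
      · rintro ⟨r, hr, he⟩; exact ⟨r, by omega, he⟩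
      · rintro ⟨r, hr, he⟩
        refine ⟨r, ?_, he⟩
        rcases lt_or_ge m r with h | h
        · omega
        · -- r ≤ m and r ≥ m impossible with r*r = target > m*m unless r = m; r = m contradicts hlt
          have : r * r ≤ m * m := by nlinarith
          omega
    · rw [dif_neg (by simp [hlt])]
      simp only [decide_eq_true_eq]
      constructor
      · intro he; exact ⟨m, le_refl _, he⟩
      · rintro ⟨r, hr, he⟩
        have : m * m ≤ r * r := by nlinarith
        -- target ≤ m*m ≤ r*r = target, so m*m = target
        omega

theorem sunnynumber_alt_iff (num : Int) (h2 : 2 ≤ num) :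
    sunnynumber_alt num = true ↔ ∃ r : Int, 0 ≤ r ∧ r * r = num + 1 := by
  have h := sunnyLoop_iff (num + 1) 0 le_rfl
  norm_num at h
  simp only [sunnynumber_alt]
  rw [if_neg (by omega)]
  exact h

-- ===== VERDICT (by name: the statement is the Claim_ definition above) =====
theorem sunnynumber_spec : Claim_equal_sunnynumber := by
  intro num _
  unfold Spec_sunnynumber
  rcases lt_or_ge num 2 with h | h
  · -- both sides false: range(1,num) is empty, and B's guard fires
    have hA : sunnynumber num = false := by
      simp [sunnynumber, PySem.List.pyRange_one_eq_nil (by omega : num ≤ 1)]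
    have hB : sunnynumber_alt num = false := by
      simp only [sunnynumber_alt]
      rw [if_pos h]
    rw [hA, hB]
  · rw [Bool.eq_iff_iff, sunnynumber_iff, sunnynumber_alt_iff num h]
    constructor
    · rintro ⟨x, h1, _, h3⟩; exact ⟨x, by omega, h3⟩
    · rintro ⟨r, hr, he⟩
      refine ⟨r, ?_, ?_, he⟩
      · nlinarith
      · nlinarith
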